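-- pv_equiv track=rewrite | github.com/ritu-thombre99/El-Gamal-and-RSA-scheme-with-Socket-Programming | rsa.py | format_plain_text
-- ===== SOURCE A (Python) =====
-- def format_plain_text(PT):
--     plain_text_blocks = []
--     for block in PT:
--         plain_text = 0
--         for i in range(len(block)):
--             # for 'd'
--             if ord(block[i]) == 100:
--                 plain_text = plain_text*100 + 28
--             # between (101,127)
--             elif ord(block[i])>100:
--                 plain_text = plain_text*100 + (ord(block[i])-100)
--             else :
--                 plain_text = plain_text*100 + (ord(block[i]))
--         plain_text_blocks.append(plain_text)
--     return plain_text_blocks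
-- ===== SOURCE B (Python) =====
-- def format_plain_text(PT):
--     blocks = []
--     for block in PT:
--         value = 0
--         mult = 1
--         for ch in reversed(block):
--             o = ord(ch)
--             code = 28 if o == 100 else (o - 100 if o > 100 else o)
--             value += code * mult
--             mult *= 100
--         blocks.append(value)
--     return blocks
-- ===== Notes on version B (the rewrite author's own statement) =====
-- stated objective: alternative
-- what changed: Replaces left-to-right Horner accumulation (value = value*100 + code) with a right-to-left pass over each block keeping a running place-value multiplier (value += code*mult; mult *= 100).
import Mathlib
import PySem

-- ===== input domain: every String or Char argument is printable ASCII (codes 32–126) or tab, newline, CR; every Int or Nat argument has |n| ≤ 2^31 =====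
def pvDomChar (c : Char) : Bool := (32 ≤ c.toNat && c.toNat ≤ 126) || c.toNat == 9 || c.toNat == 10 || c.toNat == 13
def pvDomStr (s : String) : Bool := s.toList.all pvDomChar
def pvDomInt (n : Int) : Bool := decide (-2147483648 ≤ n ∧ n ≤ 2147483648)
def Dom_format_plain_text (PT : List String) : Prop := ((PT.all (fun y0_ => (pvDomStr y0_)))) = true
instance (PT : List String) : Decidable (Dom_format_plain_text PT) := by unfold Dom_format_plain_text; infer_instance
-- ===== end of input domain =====

-- B replaces A's left-to-right Horner accumulation with a right-to-left pass keeping a running place-value multiplier; same cost, different decomposition.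


-- ===== PORT A =====
-- per-character step of A's Horner loop: plain_text = plain_text*100 + code
def pvStepA (a : Int) (c : Char) : Int :=
  if (c.toNat : Int) = 100 then a * 100 + 28
  else if (c.toNat : Int) > 100 then a * 100 + ((c.toNat : Int) - 100)
  else a * 100 + (c.toNat : Int)

def format_plain_text (PT : List String) : List Int :=
  PT.foldl (fun blocks block => blocks ++ [block.toList.foldl pvStepA 0]) []

-- ===== PORT B =====
-- per-character code mapping used by B
def pvCode (c : Char) : Int :=
  if (c.toNat : Int) = 100 then 28
  else if (c.toNat : Int) > 100 then (c.toNat : Int) - 100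
  else (c.toNat : Int)

-- B's per-block loop over reversed(block): state = (value, mult)
def pvStepB (vm : Int × Int) (c : Char) : Int × Int :=
  (vm.1 + pvCode c * vm.2, vm.2 * 100)

def format_plain_text_alt (PT : List String) : List Int :=
  PT.foldl (fun blocks block => blocks ++ [(block.toList.reverse.foldl pvStepB (0, 1)).1]) []

-- ===== PRECONDITION & SPEC =====
def Spec_format_plain_text (PT : List String) (out : List Int) : Prop := out = format_plain_text_alt PT
instance (PT : List String) (out : List Int) : Decidable (Spec_format_plain_text PT out) := by unfold Spec_format_plain_text; infer_instance

-- ===== CLAIM (what is proved, stated in full; the proofs are below) =====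
def Claim_equal_format_plain_text : Prop := ∀ (PT : List String), Dom_format_plain_text PT → Spec_format_plain_text PT (format_plain_text PT)

-- ===== LEMMAS AND PROOFS =====
theorem stepA_eq (a : Int) (c : Char) : pvStepA a c = a * 100 + pvCode c := by
  simp [pvStepA, pvCode]; split_ifs <;> ring

theorem hornerA_append (l : List Char) (c : Char) :
    (l ++ [c]).foldl pvStepA 0 = l.foldl pvStepA 0 * 100 + pvCode c := by
  simp [List.foldl_append, stepA_eq]

theorem foldB_eq (r : List Char) (v m : Int) :
    r.foldl pvStepB (v, m) = (v + m * r.reverse.foldl pvStepA 0, m * 100 ^ r.length) := by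
  induction r generalizing v m with
  | nil => simp
  | cons c t ih =>
    simp only [List.foldl_cons, pvStepB, ih, List.reverse_cons, hornerA_append,
      List.length_cons, pow_succ]
    simp only [Prod.mk.injEq]; constructor <;> ring

theorem block_eq (l : List Char) :
    (List.foldr (fun x y => pvStepB y x) (0, 1) l).1 = l.foldl pvStepA 0 := by
  rw [← List.foldl_reverse, foldB_eq]; simp

-- ===== VERDICT (by name: the statement is the Claim_ definition above) =====
theorem format_plain_text_spec : Claim_equal_format_plain_text := by
  intro PT _
  unfold Spec_format_plain_text format_plain_text format_plain_text_alt
  simp [block_eq]
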